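-- pv_equiv track=rewrite | github.com/killenden/NFL_stats | FootballDB/PullRosters.py | find_nth_capital
-- ===== SOURCE A (Python) =====
-- def find_nth_capital(input_string, n):
--     count = 0
--
--     for idx, char in enumerate(input_string):
--         if char.isupper():
--             count += 1
--             if count == n:
--                 return idx
--
--     return -1  # Return -1 if nth capital letter is not found
-- ===== SOURCE B (Python) =====
-- def find_nth_capital(input_string, n):
--     caps = [i for i, c in enumerate(input_string) if c.isupper()]
--     if 1 <= n <= len(caps):
--         return caps[n - 1]
--     return -1
-- ===== Notes on version B (the rewrite author's own statement) =====
-- stated objective: alternative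
-- what changed: Replaces the single early-exiting counting scan with a build-then-select decomposition: one pass collects all uppercase indices, then the n-th is selected by bounds-checked indexing.
import Mathlib
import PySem

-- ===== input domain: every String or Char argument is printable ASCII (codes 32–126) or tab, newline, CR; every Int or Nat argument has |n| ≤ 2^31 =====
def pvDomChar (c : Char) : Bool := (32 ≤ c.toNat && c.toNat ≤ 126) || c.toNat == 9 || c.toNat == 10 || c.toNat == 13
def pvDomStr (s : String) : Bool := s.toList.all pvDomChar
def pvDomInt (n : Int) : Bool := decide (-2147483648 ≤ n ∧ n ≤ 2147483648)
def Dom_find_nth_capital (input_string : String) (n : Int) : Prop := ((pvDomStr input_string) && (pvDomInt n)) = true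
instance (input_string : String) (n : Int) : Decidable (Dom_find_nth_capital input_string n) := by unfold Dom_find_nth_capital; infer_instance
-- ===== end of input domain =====

-- B replaces A's single early-exiting counting scan by a build-then-select decomposition
-- (collect all uppercase indices, then bounds-checked selection); objective: alternative.

-- ===== PORT A =====
-- the for-loop of A: walk the characters carrying the running index and the count, return on the n-th capital
def pvLoopA (cs : List Char) (idx count n : Int) : Int :=
  match cs with
  | [] => -1
  | c :: rest =>
    if PySem.Chars.isupper c then
      if count + 1 = n then idx else pvLoopA rest (idx + 1) (count + 1) n
    else pvLoopA rest (idx + 1) count n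

def find_nth_capital (input_string : String) (n : Int) : Int :=
  pvLoopA input_string.toList 0 0 n

-- ===== PORT B =====
def find_nth_capital_alt (input_string : String) (n : Int) : Int :=
  let caps : List Int :=
    (PySem.List.enumerate input_string.toList).filterMap
      (fun p => if PySem.Chars.isupper p.2 then some p.1 else none)
  if 1 ≤ n ∧ n ≤ caps.length then caps.getD (n - 1).toNat 0 else -1

-- ===== PRECONDITION & SPEC =====
def Spec_find_nth_capital (input_string : String) (n : Int) (out : Int) : Prop := out = find_nth_capital_alt input_string n
instance (input_string : String) (n : Int) (out : Int) : Decidable (Spec_find_nth_capital input_string n out) := by unfold Spec_find_nth_capital; infer_instance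

-- ===== CLAIM (what is proved, stated in full; the proofs are below) =====
def Claim_equal_find_nth_capital : Prop := ∀ (input_string : String) (n : Int), Dom_find_nth_capital input_string n → Spec_find_nth_capital input_string n (find_nth_capital input_string n)

-- ===== LEMMAS AND PROOFS =====

-- selection from a list of capital indices, as B does it (relative to a remaining budget m = n - count)
def pvSel (caps : List Int) (m : Int) : Int :=
  if 1 ≤ m ∧ m ≤ caps.length then caps.getD (m - 1).toNat 0 else -1

lemma pvSel_cons (i : Int) (caps : List Int) (m : Int) :
    pvSel (i :: caps) m = if m = 1 then i else if 1 ≤ m then pvSel caps (m - 1) else -1 := by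
  unfold pvSel
  rcases eq_or_ne m 1 with rfl | hm
  · simp
  · simp only [if_neg hm]
    by_cases h1 : 1 ≤ m
    · have h2 : 2 ≤ m := by omega
      simp only [if_pos h1, List.length_cons]
      have hn : ((m : Int) - 1).toNat = ((m - 1 - 1).toNat) + 1 := by omega
      by_cases hle : m ≤ (caps.length : Int) + 1
      · rw [if_pos ⟨by omega, by push_cast; omega⟩, if_pos ⟨by omega, by omega⟩, hn]
        simp
      · rw [if_neg (by push_cast; omega), if_neg (by omega)]
    · rw [if_neg h1, if_neg (show ¬(1 ≤ m ∧ m ≤ ((i :: caps).length : Int)) from fun h => h1 h.1)]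

lemma pvLoopA_shift (cs : List Char) (idx count n : Int) :
    pvLoopA cs idx count n = pvLoopA cs idx 0 (n - count) := by
  induction cs generalizing idx count n with
  | nil => simp [pvLoopA]
  | cons c rest ih =>
    by_cases hc : PySem.Chars.isupper c
    · simp only [pvLoopA, hc, if_true, zero_add]
      by_cases he : count + 1 = n
      · rw [if_pos he, if_pos (by omega)]
      · rw [if_neg he, if_neg (by omega), ih (idx+1) (count+1) n, ih (idx+1) 1 (n-count)]
        ring_nf
    · simp only [pvLoopA, hc]
      exact ih (idx+1) count n

lemma pvLoopA_neg (cs : List Char) (idx n : Int) :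
    n ≤ 0 → pvLoopA cs idx 0 n = -1 := by
  induction cs generalizing idx n with
  | nil => simp [pvLoopA]
  | cons c rest ih =>
    intro h
    by_cases hc : PySem.Chars.isupper c
    · simp only [pvLoopA, hc, if_true, zero_add]
      rw [if_neg (by omega), pvLoopA_shift]
      exact ih (idx+1) (n-1) (by omega)
    · simp only [pvLoopA, hc]
      exact ih (idx+1) n h

-- A's loop computes B's selection on the capitals of the remaining suffix
lemma pvLoopA_eq_sel (cs : List Char) (idx m : Int) :
    pvLoopA cs idx 0 m =
      pvSel ((PySem.List.enumerate cs idx).filterMap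
        (fun p => if PySem.Chars.isupper p.2 then some p.1 else none)) m := by
  induction cs generalizing idx m with
  | nil =>
    simp [pvLoopA, PySem.List.enumerate_nil, pvSel]
    omega
  | cons c rest ih =>
    rw [PySem.List.enumerate_cons]
    by_cases hc : PySem.Chars.isupper c
    · simp only [pvLoopA, hc, if_true, List.filterMap_cons, pvSel_cons, zero_add]
      by_cases hm : m = 1
      · simp [hm]
      · rw [if_neg hm]
        by_cases h1 : 1 ≤ m
        · rw [if_pos h1, pvLoopA_shift rest (idx + 1) 1 m, ih (idx + 1) (m - 1),
            if_neg (show ¬(1 = m) by omega)]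
        · rw [if_neg h1, if_neg (show ¬(1 = m) by omega), pvLoopA_shift]
          exact pvLoopA_neg rest (idx + 1) (m - 1) (by omega)
    · simp only [pvLoopA, hc, List.filterMap_cons, Bool.false_eq_true, if_false]
      exact ih (idx + 1) m

-- ===== VERDICT (by name: the statement is the Claim_ definition above) =====
theorem find_nth_capital_spec : Claim_equal_find_nth_capital := by
  intro s n _
  unfold Spec_find_nth_capital find_nth_capital find_nth_capital_alt
  rw [pvLoopA_eq_sel]
  rfl
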